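-- pv_equiv track=rewrite | github.com/cyberdudebivash/CYBERDUDEBIVASH-THREAT-INTEL-PLATFORM | agent/predictive/risk_trend_model.py | _compute_severity_distribution
-- ===== SOURCE A (Python) =====
-- from typing import Dict, List, Optional, Tuple
--
-- def _compute_severity_distribution(entries: List[Dict]) -> Dict[str, int]:
--     dist: Dict[str, int] = {"CRITICAL": 0, "HIGH": 0, "MEDIUM": 0, "LOW": 0, "INFO": 0}
--     for entry in entries:
--         sev = entry.get("severity", "").upper()
--         if sev in dist:
--             dist[sev] += 1
--         else:
--             dist["INFO"] += 1
--     return dist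
-- ===== SOURCE B (Python) =====
-- def _compute_severity_distribution(entries):
--     sevs = [e.get("severity", "").upper() for e in entries]
--     named = ("CRITICAL", "HIGH", "MEDIUM", "LOW")
--     dist = {k: sevs.count(k) for k in named}
--     dist["INFO"] = sum(1 for s in sevs if s not in named)
--     return dist
-- ===== Notes on version B (the rewrite author's own statement) =====
-- stated objective: alternative
-- what changed: Replaces A's single pass with per-entry if/else increments into a pre-seeded dict by staged passes: normalize the severities once, then count each named severity with its own .count() scan and count INFO with a separate not-in scan (no branching accumulator, no pre-seeded dict).
import Mathlib
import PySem

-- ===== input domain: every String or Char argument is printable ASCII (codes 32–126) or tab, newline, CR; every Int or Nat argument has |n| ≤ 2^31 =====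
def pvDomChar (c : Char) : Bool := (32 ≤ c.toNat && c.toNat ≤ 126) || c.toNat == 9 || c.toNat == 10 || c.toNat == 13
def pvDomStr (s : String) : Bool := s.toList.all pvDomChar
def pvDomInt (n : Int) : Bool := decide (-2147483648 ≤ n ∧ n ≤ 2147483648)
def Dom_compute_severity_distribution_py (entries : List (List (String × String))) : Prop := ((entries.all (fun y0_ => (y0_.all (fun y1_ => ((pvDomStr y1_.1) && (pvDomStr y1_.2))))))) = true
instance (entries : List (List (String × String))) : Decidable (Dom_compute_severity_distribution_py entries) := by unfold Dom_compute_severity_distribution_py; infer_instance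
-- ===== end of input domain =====

-- B replaces A's one-pass branching accumulator with staged passes: normalize the
-- severities once, count each named severity with its own scan, and count INFO with a
-- separate not-in scan (objective: alternative decomposition, same O(n) cost).

-- ===== PORT A =====
-- loop state is the dict; 'sev in dist' → contains, 'dist[k] += 1' → insert with getD+1
def compute_severity_distribution_py (entries : List (List (String × String))) : List (String × Int) :=
  let dist0 : PySem.Dict String Int :=
    PySem.Dict.ofList [("CRITICAL", 0), ("HIGH", 0), ("MEDIUM", 0), ("LOW", 0), ("INFO", 0)]
  let final := entries.foldl (fun dist entry =>
    let sev := PySem.Str.upper (PySem.Dict.getD (PySem.Dict.mk entry) "severity" "")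
    if PySem.Dict.contains dist sev then
      PySem.Dict.insert dist sev (PySem.Dict.getD dist sev 0 + 1)
    else
      PySem.Dict.insert dist "INFO" (PySem.Dict.getD dist "INFO" 0 + 1)) dist0
  final.items

-- ===== PORT B =====
-- normalize once; one .count scan per named key; INFO by a separate not-in scan
-- 's not in named' from Source B
def pInfo (s : String) : Bool := decide (s ∉ (["CRITICAL", "HIGH", "MEDIUM", "LOW"] : List String))
def compute_severity_distribution_py_alt (entries : List (List (String × String))) : List (String × Int) :=
  let sevs := entries.map (fun e =>
    PySem.Str.upper (PySem.Dict.getD (PySem.Dict.mk e) "severity" ""))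
  [("CRITICAL", (sevs.count "CRITICAL" : Int)),
   ("HIGH", (sevs.count "HIGH" : Int)),
   ("MEDIUM", (sevs.count "MEDIUM" : Int)),
   ("LOW", (sevs.count "LOW" : Int)),
   ("INFO", ((sevs.filter pInfo).length : Int))]

-- ===== PRECONDITION & SPEC =====
def Spec_compute_severity_distribution_py (entries : List (List (String × String))) (out : List (String × Int)) : Prop := out = compute_severity_distribution_py_alt entries
instance (entries : List (List (String × String))) (out : List (String × Int)) : Decidable (Spec_compute_severity_distribution_py entries out) := by unfold Spec_compute_severity_distribution_py; infer_instance

-- ===== CLAIM (what is proved, stated in full; the proofs are below) =====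
def Claim_equal_compute_severity_distribution_py : Prop := ∀ (entries : List (List (String × String))), Dom_compute_severity_distribution_py entries → Spec_compute_severity_distribution_py entries (compute_severity_distribution_py entries)

-- ===== LEMMAS AND PROOFS =====

/-- The five-slot dict A's loop maintains. -/
def sevDict (a b c d e : Int) : PySem.Dict String Int :=
  PySem.Dict.mk [("CRITICAL", a), ("HIGH", b), ("MEDIUM", c), ("LOW", d), ("INFO", e)]

/-- entry.get("severity", "").upper() -/
def sevOf (e : List (String × String)) : String :=
  PySem.Str.upper (PySem.Dict.getD (PySem.Dict.mk e) "severity" "")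

/-- Indicator. -/
def ind (s k : String) : Int := if s = k then 1 else 0

lemma stepA (a b c d e : Int) (x : List (String × String)) :
    (if PySem.Dict.contains (sevDict a b c d e) (PySem.Str.upper (PySem.Dict.getD (PySem.Dict.mk x) "severity" "")) then
       PySem.Dict.insert (sevDict a b c d e) (PySem.Str.upper (PySem.Dict.getD (PySem.Dict.mk x) "severity" ""))
         (PySem.Dict.getD (sevDict a b c d e) (PySem.Str.upper (PySem.Dict.getD (PySem.Dict.mk x) "severity" "")) 0 + 1)
     else
       PySem.Dict.insert (sevDict a b c d e) "INFO" (PySem.Dict.getD (sevDict a b c d e) "INFO" 0 + 1))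
    = sevDict (a + ind (sevOf x) "CRITICAL") (b + ind (sevOf x) "HIGH")
        (c + ind (sevOf x) "MEDIUM") (d + ind (sevOf x) "LOW")
        (e + (1 - (ind (sevOf x) "CRITICAL" + ind (sevOf x) "HIGH"
                 + ind (sevOf x) "MEDIUM" + ind (sevOf x) "LOW"))) := by
  have hs : PySem.Str.upper (PySem.Dict.getD (PySem.Dict.mk x) "severity" "") = sevOf x := rfl
  simp only [hs]
  by_cases h1 : sevOf x = "CRITICAL"
  · simp [sevDict, h1, ind, PySem.Dict.insert, PySem.Dict.getD_eq_get?_getD, PySem.Dict.get?_mk_cons]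
  by_cases h2 : sevOf x = "HIGH"
  · simp [sevDict, h2, ind, PySem.Dict.insert, PySem.Dict.getD_eq_get?_getD, PySem.Dict.get?_mk_cons]
  by_cases h3 : sevOf x = "MEDIUM"
  · simp [sevDict, h3, ind, PySem.Dict.insert, PySem.Dict.getD_eq_get?_getD, PySem.Dict.get?_mk_cons]
  by_cases h4 : sevOf x = "LOW"
  · simp [sevDict, h4, ind, PySem.Dict.insert, PySem.Dict.getD_eq_get?_getD, PySem.Dict.get?_mk_cons]
  by_cases h5 : sevOf x = "INFO"
  · simp [sevDict, h5, ind, PySem.Dict.insert, PySem.Dict.getD_eq_get?_getD,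
      PySem.Dict.get?_mk_cons]
  · have hc : PySem.Dict.contains (sevDict a b c d e) (sevOf x) = false := by
      simp [sevDict]
      exact ⟨Ne.symm h1, Ne.symm h2, Ne.symm h3, Ne.symm h4, Ne.symm h5⟩
    rw [hc]
    simp [sevDict, ind, h1, h2, h3, h4, PySem.Dict.insert, PySem.Dict.getD_eq_get?_getD,
      PySem.Dict.get?_mk_cons]

lemma loopA (l : List (List (String × String))) (a b c d e : Int) :
    l.foldl (fun dist entry =>
      if PySem.Dict.contains dist (PySem.Str.upper (PySem.Dict.getD (PySem.Dict.mk entry) "severity" "")) then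
        PySem.Dict.insert dist (PySem.Str.upper (PySem.Dict.getD (PySem.Dict.mk entry) "severity" ""))
          (PySem.Dict.getD dist (PySem.Str.upper (PySem.Dict.getD (PySem.Dict.mk entry) "severity" "")) 0 + 1)
      else
        PySem.Dict.insert dist "INFO" (PySem.Dict.getD dist "INFO" 0 + 1)) (sevDict a b c d e)
    = sevDict (a + (l.map sevOf).count "CRITICAL") (b + (l.map sevOf).count "HIGH")
        (c + (l.map sevOf).count "MEDIUM") (d + (l.map sevOf).count "LOW")
        (e + ((l.length : Int)
          - ((l.map sevOf).count "CRITICAL" + (l.map sevOf).count "HIGH"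
            + (l.map sevOf).count "MEDIUM" + (l.map sevOf).count "LOW"))) := by
  induction l generalizing a b c d e with
  | nil => simp [sevDict]
  | cons x xs ih =>
    rw [List.foldl_cons, stepA, ih]
    simp only [sevDict, PySem.Dict.mk.injEq, List.cons.injEq, Prod.mk.injEq, List.map_cons,
      List.count_cons, List.length_cons, beq_iff_eq, ind, and_true, true_and]
    refine ⟨?_, ?_, ?_, ?_, ?_⟩ <;> split_ifs <;> push_cast <;> omega

/-- Each element goes to exactly one of the five buckets. -/
lemma partNat (l : List String) :
    (l.filter pInfo).length + l.count "CRITICAL" + l.count "HIGH"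
      + l.count "MEDIUM" + l.count "LOW" = l.length := by
  induction l with
  | nil => simp
  | cons x xs ih =>
    rw [List.filter_cons]
    by_cases hmem : x ∈ (["CRITICAL", "HIGH", "MEDIUM", "LOW"] : List String)
    · simp only [List.mem_cons, List.not_mem_nil, or_false] at hmem
      rcases hmem with h' | h' | h' | h' <;> subst h' <;>
        simp [pInfo] <;> omega
    · have h : pInfo x = true := by simp [pInfo, hmem]
      have hne : ¬(x = "CRITICAL") ∧ ¬(x = "HIGH") ∧ ¬(x = "MEDIUM") ∧ ¬(x = "LOW") := by
        simpa [List.mem_cons, not_or] using hmem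
      obtain ⟨h1, h2, h3, h4⟩ := hne
      simp [h, h1, h2, h3, h4]
      omega

/-- The not-in scan counts the complement of the four named counts. -/
lemma infoCount (l : List String) :
    ((l.filter pInfo).length : Int)
    = (l.length : Int)
      - ((l.count "CRITICAL" : Int) + l.count "HIGH" + l.count "MEDIUM" + l.count "LOW") := by
  have := partNat l
  omega

-- ===== VERDICT (by name: the statement is the Claim_ definition above) =====
theorem compute_severity_distribution_py_spec : Claim_equal_compute_severity_distribution_py := by
  intro entries _
  show compute_severity_distribution_py entries = compute_severity_distribution_py_alt entries
  simp only [compute_severity_distribution_py, compute_severity_distribution_py_alt]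
  have h0 : PySem.Dict.ofList
      [("CRITICAL", (0:Int)), ("HIGH", 0), ("MEDIUM", 0), ("LOW", 0), ("INFO", 0)]
      = sevDict 0 0 0 0 0 := by decide
  rw [h0, loopA]
  have hmap : (entries.map (fun e =>
      PySem.Str.upper (PySem.Dict.getD (PySem.Dict.mk e) "severity" ""))) = entries.map sevOf := by
    simp [sevOf]
  simp only [hmap, sevDict, infoCount]
  simp
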